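-- pv_equiv track=rewrite | github.com/davidzindovic/Educational-staircase | Code/Launch_NoDesktop_RPI_code.py | get_correct_answer
-- ===== SOURCE A (Python) =====
-- def get_correct_answer(equation_text):
--     """
--     Extracts the correct answer before '_'
--     """
--     if "_" in equation_text:
--         underscore_index = equation_text.index("_")
--         num_start = underscore_index - 1
--         while num_start >= 0 and equation_text[num_start].isdigit():
--             num_start -= 1
--         return equation_text[num_start + 1:underscore_index]
--     return None
-- ===== SOURCE B (Python) =====
-- def get_correct_answer(equation_text):
--     """
--     Extracts the correct answer before '_'
--     """
--     run = ""
--     for ch in equation_text: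
--         if ch == "_":
--             return run
--         run = run + ch if ch.isdigit() else ""
--     return None
-- ===== Notes on version B (the rewrite author's own statement) =====
-- stated objective: simpler
-- what changed: Replaces A's membership test + index('_') + backward index walk with a single forward pass that maintains the current run of digits (reset on any non-digit) and returns it the moment the first '_' is seen, falling through to None if no underscore occurs.
import Mathlib
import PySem

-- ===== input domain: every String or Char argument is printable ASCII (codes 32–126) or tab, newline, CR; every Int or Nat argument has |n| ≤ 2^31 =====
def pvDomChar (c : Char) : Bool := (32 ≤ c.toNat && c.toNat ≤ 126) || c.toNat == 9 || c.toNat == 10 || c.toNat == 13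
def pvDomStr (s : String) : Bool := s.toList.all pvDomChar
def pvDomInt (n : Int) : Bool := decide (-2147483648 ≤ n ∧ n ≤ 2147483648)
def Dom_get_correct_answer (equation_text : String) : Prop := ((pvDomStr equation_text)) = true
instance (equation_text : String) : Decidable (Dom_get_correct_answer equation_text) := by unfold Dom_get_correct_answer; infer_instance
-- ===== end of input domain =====

-- B replaces A's find-the-underscore-then-walk-backwards with one forward pass keeping the current digit run (reset on non-digits); simpler, same cost.


-- ===== PORT A =====
-- the while loop: called with n = num_start + 1, returns the final num_start.
-- s[num_start] is always in range here (0 ≤ num_start < index of '_'), so `.elim false` on pyGet? is exact.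
def pvLoopA (cs : List Char) : Nat → Int
  | 0 => -1
  | Nat.succ n =>
      if (PySem.List.pyGet? cs (n : Int)).elim false (fun c => c.isDigit) then pvLoopA cs n
      else (n : Int)

def get_correct_answer (equation_text : String) : Option String :=
  let cs := equation_text.toList
  if PySem.Chars.isIn ['_'] cs then
    -- equation_text.index("_"): guarded by the membership test, so find is ≥ 0
    let underscore_index := (PySem.Chars.find cs ['_']).toNat
    let num_start := pvLoopA cs underscore_index
    some (String.ofList (PySem.List.slice cs (some (num_start + 1)) (some (underscore_index : Int))))
  else none

-- ===== PORT B =====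
-- the for loop with its `run` accumulator; `return run` inside the loop = the `some` branch,
-- falling off the loop = the final `return None`.
def pvLoopB : List Char → List Char → Option String
  | [], _ => none
  | c :: rest, run =>
      if c = '_' then some (String.ofList run)
      else pvLoopB rest (if c.isDigit then run ++ [c] else [])

def get_correct_answer_alt (equation_text : String) : Option String :=
  pvLoopB equation_text.toList []

-- ===== PRECONDITION & SPEC =====
def Spec_get_correct_answer (equation_text : String) (out : Option String) : Prop := out = get_correct_answer_alt equation_text
instance (equation_text : String) (out : Option String) : Decidable (Spec_get_correct_answer equation_text out) := by unfold Spec_get_correct_answer; infer_instance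

-- ===== CLAIM (what is proved, stated in full; the proofs are below) =====
def Claim_equal_get_correct_answer : Prop := ∀ (equation_text : String), Dom_get_correct_answer equation_text → Spec_get_correct_answer equation_text (get_correct_answer equation_text)

-- ===== LEMMAS AND PROOFS =====

-- A's loop: final num_start = n - 1 - (number of trailing digits of cs.take n)
lemma pvLoopA_eq (cs : List Char) :
    ∀ n, n ≤ cs.length →
      pvLoopA cs n = (n : Int) - 1 - (((cs.take n).reverse.takeWhile Char.isDigit).length : Int) := by
  intro n
  induction n with
  | zero => simp [pvLoopA]
  | succ n ih =>
    intro h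
    have hn : n < cs.length := by omega
    have hget : PySem.List.pyGet? cs (n : Int) = some (cs[n]'hn) := by
      simp [PySem.List.pyGet?_natCast, List.getElem?_eq_getElem hn]
    have htake : cs.take (n+1) = cs.take n ++ [cs[n]'hn] := by
      rw [List.take_add_one, List.getElem?_eq_getElem hn]; rfl
    rw [pvLoopA, hget, htake]
    simp only [Option.elim, List.reverse_append, List.reverse_cons, List.reverse_nil,
      List.nil_append, List.singleton_append, List.takeWhile_cons]
    by_cases hd : (cs[n]'hn).isDigit
    · simp only [hd, if_true, List.length_cons]
      rw [ih (by omega)]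
      push_cast; ring
    · simp [hd]

-- the text before the first '_' is cs.take idx
lemma takeWhile_ne_eq_take (cs : List Char) :
    ∀ idx, ∀ hlt : idx < cs.length,
    (∀ j (hj : j < idx), cs[j]'(by omega) ≠ '_') → cs[idx] = '_' →
    cs.takeWhile (· ≠ '_') = cs.take idx := by
  induction cs with
  | nil => intro idx h; simp at h
  | cons x xs ih =>
    intro idx hlt hbefore hat
    cases idx with
    | zero => simp_all
    | succ k =>
      have hx : x ≠ '_' := hbefore 0 (by omega)
      simp only [List.takeWhile_cons, List.take_succ_cons, hx, decide_not, decide_false,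
        Bool.not_false, if_true, List.cons.injEq, true_and]
      simpa only [decide_not] using
        ih k (by simpa using hlt) (fun j hj => hbefore (j+1) (by omega)) (by simpa using hat)

-- dropping everything but the trailing-digit run = the reversed takeWhile on the reverse
lemma drop_eq_tdr (l : List Char) :
    l.drop (l.length - (l.reverse.takeWhile Char.isDigit).length) =
      (l.reverse.takeWhile Char.isDigit).reverse := by
  have hsplit : l.reverse.takeWhile Char.isDigit ++ l.reverse.dropWhile Char.isDigit = l.reverse :=
    List.takeWhile_append_dropWhile
  have hl : (l.reverse.dropWhile Char.isDigit).reverse ++ (l.reverse.takeWhile Char.isDigit).reverse = l := by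
    rw [← List.reverse_append, hsplit, List.reverse_reverse]
  have hlen : l.length - (l.reverse.takeWhile Char.isDigit).length =
      ((l.reverse.dropWhile Char.isDigit).reverse).length := by
    have := congrArg List.length hsplit
    simp only [List.length_append, List.length_reverse] at this ⊢
    omega
  have hd := List.drop_left (l₁ := (l.reverse.dropWhile Char.isDigit).reverse)
    (l₂ := (l.reverse.takeWhile Char.isDigit).reverse)
  rw [hl] at hd
  rw [hlen]
  exact hd

-- B's loop never returns when '_' is absent
lemma pvLoopB_none (cs : List Char) : ∀ run, '_' ∉ cs → pvLoopB cs run = none := by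
  induction cs with
  | nil => intro run _; rfl
  | cons c rest ih =>
    intro run h
    have hc : c ≠ '_' := fun hh => h (hh ▸ List.mem_cons_self)
    rw [pvLoopB, if_neg hc]
    exact ih _ (fun hm => h (List.mem_cons_of_mem _ hm))

-- B's loop invariant: run is the trailing digit run of the consumed prefix
lemma pvLoopB_mem (cs : List Char) :
    ∀ run, (∀ x ∈ run, x.isDigit) → '_' ∈ cs →
      pvLoopB cs run =
        some (String.ofList (((run ++ cs.takeWhile (· ≠ '_')).reverse.takeWhile Char.isDigit).reverse)) := by
  induction cs with
  | nil => intro run _ h; simp at h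
  | cons c rest ih =>
    intro run hrun hmem
    by_cases hc : c = '_'
    · subst hc
      rw [pvLoopB, if_pos rfl]
      have htw : (('_' :: rest).takeWhile (· ≠ '_')) = [] := by simp
      rw [htw]
      have hall : run.reverse.takeWhile Char.isDigit = run.reverse := by
        rw [List.takeWhile_eq_self_iff]
        intro x hx
        simpa using hrun x (List.mem_reverse.mp hx)
      simp [hall]
    · have hmem' : '_' ∈ rest := by
        rcases List.mem_cons.mp hmem with h | h
        · exact absurd h.symm hc
        · exact h
      rw [pvLoopB, if_neg hc]
      have htw : (c :: rest).takeWhile (· ≠ '_') = c :: rest.takeWhile (· ≠ '_') := by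
        simp [hc]
      by_cases hd : c.isDigit
      · rw [if_pos hd, ih (run ++ [c]) (by
          intro x hx
          rcases List.mem_append.mp hx with h | h
          · exact hrun x h
          · simpa [List.mem_singleton.mp h] ) hmem']
        rw [htw]
        simp [List.append_assoc]
      · rw [if_neg hd, ih [] (by simp) hmem']
        rw [htw]
        congr 2
        have h1 : (run ++ c :: rest.takeWhile (· ≠ '_')).reverse =
            (rest.takeWhile (· ≠ '_')).reverse ++ (c :: run.reverse) := by
          simp
        rw [h1, List.takeWhile_append]
        by_cases hall : ((rest.takeWhile (· ≠ '_')).reverse.takeWhile Char.isDigit).length =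
            (rest.takeWhile (· ≠ '_')).reverse.length
        · rw [if_pos hall]
          have htwc : (c :: run.reverse).takeWhile Char.isDigit = [] := by
            simp [hd]
          have hself : (rest.takeWhile (· ≠ '_')).reverse.takeWhile Char.isDigit =
              (rest.takeWhile (· ≠ '_')).reverse :=
            (List.takeWhile_prefix _).eq_of_length hall
          rw [htwc, List.append_nil]
          simp only [List.nil_append]
          rw [hself]
        · rw [if_neg hall]
          simp only [List.nil_append]

theorem get_correct_answer_spec : Claim_equal_get_correct_answer := by
  intro s _
  unfold Spec_get_correct_answer get_correct_answer get_correct_answer_alt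
  set cs := s.toList with hcs
  by_cases hin : PySem.Chars.isIn ['_'] cs = true
  · simp only [hin, if_true]
    have hinf : ['_'] <:+: cs := (PySem.Chars.isIn_iff_infix _ _).mp hin
    have hmem : '_' ∈ cs := hinf.subset List.mem_cons_self
    have hnn : 0 ≤ PySem.Chars.find cs ['_'] := (PySem.Chars.find_nonneg_iff _ _).mpr hinf
    obtain ⟨hpre, hmin⟩ := PySem.Chars.find_spec hnn
    set idx := (PySem.Chars.find cs ['_']).toNat with hidx
    obtain ⟨t0, ht0⟩ := hpre
    have hlt : idx < cs.length := by
      by_contra hge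
      rw [List.drop_eq_nil_of_le (by omega)] at ht0
      simp at ht0
    have hat : cs[idx] = '_' := by
      have h0 : (cs.drop idx)[0]'(by rw [← ht0]; simp) = '_' := by
        simp [← ht0]
      simpa [List.getElem_drop] using h0
    have hbefore : ∀ j (hj : j < idx), cs[j]'(by omega) ≠ '_' := by
      intro j hj hone
      apply hmin j hj
      exact ⟨cs.drop (j+1), by rw [← hone]; exact (List.drop_eq_getElem_cons (by omega)).symm⟩
    have htw : cs.takeWhile (· ≠ '_') = cs.take idx :=
      takeWhile_ne_eq_take cs idx hlt hbefore hat
    set t := ((cs.take idx).reverse.takeWhile Char.isDigit).length with htdef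
    have hloop : pvLoopA cs idx = (idx : Int) - 1 - (t : Int) := pvLoopA_eq cs idx (by omega)
    have hlen_take : (cs.take idx).length = idx := by simp [List.length_take]; omega
    have hcast : pvLoopA cs idx + 1 = ((idx - t : Nat) : Int) := by
      have ht_le : t ≤ idx := by
        have := (List.takeWhile_prefix (p := Char.isDigit)
          (l := (cs.take idx).reverse)).length_le
        simpa [hlen_take] using this
      rw [hloop]; omega
    rw [hcast, PySem.List.slice_natCast]
    rw [pvLoopB_mem cs [] (by simp) hmem, htw]
    have hdrop : (cs.take idx).drop (idx - t) =
        ((cs.take idx).reverse.takeWhile Char.isDigit).reverse := by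
      have := drop_eq_tdr (cs.take idx)
      rwa [hlen_take] at this
    rw [← List.drop_take]
    simp only [List.nil_append]
    rw [hdrop]
  · have hin' : PySem.Chars.isIn ['_'] cs = false := by
      simpa using hin
    have hninf : ¬ ['_'] <:+: cs := (PySem.Chars.isIn_eq_false_iff _ _).mp hin'
    have hnm : '_' ∉ cs := by
      intro hm
      rcases List.mem_iff_append.mp hm with ⟨p, q, hpq⟩
      exact hninf ⟨p, q, by rw [hpq]; simp⟩
    simp only [hin', Bool.false_eq_true, if_false]
    exact (pvLoopB_none cs [] hnm).symm
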